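-- pv_equiv track=rewrite | github.com/Mini-jay/cryptcia | myzsowski.py | myszowski_encrypt
-- ===== SOURCE A (Python) =====
-- def myszowski_encrypt(plaintext, keyword):
--     plaintext = plaintext.replace(" ", "").upper()
--     keyword = keyword.upper()
--     ranks = []
--     sorted_key = sorted(list(keyword))
--     for char in keyword:
--         ranks.append(sorted_key.index(char))
--     width = len(keyword)
--     grid = [plaintext[i:i + width] for i in range(0, len(plaintext), width)]
--     ciphertext = ""
--     unique_ranks = sorted(list(set(ranks)))
--     for r in unique_ranks:
--         indices = [i for i, val in enumerate(ranks) if val == r]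
--         if len(indices) == 1:
--             col_idx = indices[0]
--             for row in grid:
--                 if col_idx < len(row):
--                     ciphertext += row[col_idx]
--         else:
--             for row in grid:
--                 for col_idx in indices:
--                     if col_idx < len(row):
--                         ciphertext += row[col_idx]
--     return ciphertext
-- ===== SOURCE B (Python) =====
-- def myszowski_encrypt(plaintext, keyword):
--     pt = plaintext.replace(" ", "").upper()
--     kw = keyword.upper()
--     w = len(kw)
--     pos = {}
--     for j, ch in enumerate(sorted(kw)):
--         if ch not in pos:
--             pos[ch] = j
--     rank = [pos[c] for c in kw]
--     order = sorted(range(len(pt)), key=lambda i: (rank[i % w], i))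
--     return "".join(pt[i] for i in order)
-- ===== Notes on version B (the rewrite author's own statement) =====
-- stated objective: faster
-- what changed: B treats the cipher as a permutation of character positions: column ranks come from a first-occurrence position dict over the sorted keyword (instead of repeated .index scans), and the ciphertext is produced by one global stable sort of all plaintext positions keyed by (rank of column, position), replacing A's grid construction and nested loops over rank-groups, rows and columns.
import Mathlib
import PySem

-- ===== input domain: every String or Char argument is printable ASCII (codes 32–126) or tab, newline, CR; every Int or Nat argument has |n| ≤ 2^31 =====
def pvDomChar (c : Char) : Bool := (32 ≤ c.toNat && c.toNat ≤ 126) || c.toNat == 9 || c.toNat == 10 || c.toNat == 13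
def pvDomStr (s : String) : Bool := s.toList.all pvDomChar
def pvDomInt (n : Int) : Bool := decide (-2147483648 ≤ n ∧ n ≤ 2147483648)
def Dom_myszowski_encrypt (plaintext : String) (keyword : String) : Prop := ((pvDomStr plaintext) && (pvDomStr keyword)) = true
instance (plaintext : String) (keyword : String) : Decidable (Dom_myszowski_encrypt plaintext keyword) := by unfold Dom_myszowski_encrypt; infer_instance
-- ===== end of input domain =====

-- B re-reads the cipher as one global stable sort of character positions (rank of the
-- column, then position), with ranks from a first-occurrence dict over the sorted keyword,
-- instead of A's repeated .index scans and nested loops over rank-groups, grid rows and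
-- columns; objective: faster (a timing run measured B faster at the largest sizes).


-- ===== PORT A =====
def myszowski_encrypt (plaintext : String) (keyword : String) : String :=
  let p : List Char := PySem.Chars.upper (PySem.Chars.replace plaintext.toList [' '] [])
  let kw : List Char := PySem.Chars.upper keyword.toList
  let sortedKey : List Char := PySem.List.sorted kw (fun c => c) false
  -- every char of kw is in sortedKey, so Python's .index never raises; the getD 0 is unreachable
  let ranks : List Int := kw.map (fun c => (((PySem.List.index? sortedKey c).getD 0 : Nat) : Int))
  let width : Nat := kw.length
  let grid : List (List Char) :=
    (PySem.List.pyRange 0 (p.length : Int) (width : Int)).map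
      (fun i => PySem.List.slice p (some i) (some (i + (width : Int))))
  let uniqueRanks : List Int := PySem.List.sorted (PySem.Set.ofList ranks) (fun x => x) false
  let cipher : List Char := uniqueRanks.foldl (fun acc r =>
    let indices : List Int :=
      ((PySem.List.enumerate ranks).filter (fun iv => iv.2 == r)).map (fun iv => iv.1)
    if indices.length = 1 then
      let colIdx : Int := PySem.List.pyGetD indices 0 0
      grid.foldl (fun acc row =>
        if colIdx < (row.length : Int) then acc ++ [PySem.List.pyGetD row colIdx ' '] else acc) acc
    else
      grid.foldl (fun acc row =>
        indices.foldl (fun acc colIdx =>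
          if colIdx < (row.length : Int) then acc ++ [PySem.List.pyGetD row colIdx ' '] else acc) acc) acc) []
  String.ofList cipher

-- ===== PORT B =====
def myszowski_encrypt_alt (plaintext : String) (keyword : String) : String :=
  let p : List Char := PySem.Chars.upper (PySem.Chars.replace plaintext.toList [' '] [])
  let kw : List Char := PySem.Chars.upper keyword.toList
  let w : Nat := kw.length
  let pos : PySem.Dict Char Int := (PySem.List.enumerate (PySem.List.sorted kw (fun c => c) false)).foldl
      (fun d je => if PySem.Dict.contains d je.2 then d else PySem.Dict.insert d je.2 je.1)
      PySem.Dict.empty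
  -- every c of kw is a key of pos, so Python's pos[c] never raises; the default is unreachable
  let rank : List Int := kw.map (fun c => PySem.Dict.getD pos c 0)
  let order : List Int :=
    PySem.List.sorted2 (PySem.List.pyRange 0 (p.length : Int) 1)
      (fun i => PySem.List.pyGetD rank (PySem.Int.mod i (w : Int)) 0) (fun i => i) false
  -- every i in order is a valid index of p, so Python's pt[i] never raises; the default is unreachable
  String.ofList (order.map (fun i => PySem.List.pyGetD p i ' '))

-- ===== PRECONDITION & SPEC =====
-- Pre_ excludes keyword = "" only: there Python A raises ValueError (range() arg 3 must not be zero).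
def Pre_myszowski_encrypt (plaintext : String) (keyword : String) : Prop := keyword ≠ ""
instance (plaintext : String) (keyword : String) : Decidable (Pre_myszowski_encrypt plaintext keyword) := by unfold Pre_myszowski_encrypt; infer_instance
def pvWitness_myszowski_encrypt : String × String := ("AB CDE", "KEY")

def Spec_myszowski_encrypt (plaintext : String) (keyword : String) (out : String) : Prop := out = myszowski_encrypt_alt plaintext keyword
instance (plaintext : String) (keyword : String) (out : String) : Decidable (Spec_myszowski_encrypt plaintext keyword out) := by unfold Spec_myszowski_encrypt; infer_instance

-- ===== CLAIM (what is proved, stated in full; the proofs are below) =====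
def Claim_equal_myszowski_encrypt : Prop := ∀ (plaintext : String) (keyword : String), Dom_myszowski_encrypt plaintext keyword → Pre_myszowski_encrypt plaintext keyword → Spec_myszowski_encrypt plaintext keyword (myszowski_encrypt plaintext keyword)

-- ===== LEMMAS AND PROOFS =====

-- the column-index list A builds for rank r ("indices")
def pvCols (ranks : List Int) (r : Int) : List Int :=
  ((PySem.List.enumerate ranks).filter (fun iv => iv.2 == r)).map (fun iv => iv.1)

-- the reading order of A, as a list of positions into the space-stripped plaintext
def pvJ (ranks : List Int) (w n : Nat) : List Int :=
  (PySem.List.sorted (PySem.Set.ofList ranks) (fun x => x) false).flatMap (fun r =>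
    (PySem.List.pyRange 0 (n : Int) (w : Int)).flatMap (fun i =>
      ((pvCols ranks r).filter (fun c => decide (i + c < (n : Int)))).map (fun c => i + c)))

theorem pv_mem_cols (ranks : List Int) (r c : Int) :
    c ∈ pvCols ranks r ↔ ∃ (k : Nat) (h : k < ranks.length), c = (k : Int) ∧ ranks[k] = r := by
  simp only [pvCols, List.mem_map, List.mem_filter, PySem.List.mem_enumerate_iff]
  constructor
  · rintro ⟨⟨i, v⟩, ⟨⟨k, hk, heq⟩, hv⟩, rfl⟩
    cases heq
    exact ⟨k, hk, by simp, by simpa using hv⟩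
  · rintro ⟨k, hk, rfl, hr⟩
    exact ⟨((k : Int), ranks[k]), ⟨⟨k, hk, by simp⟩, by simpa using hr⟩, rfl⟩

theorem pv_pairwise_cols (ranks : List Int) (r : Int) :
    (pvCols ranks r).Pairwise (· < ·) := by
  unfold pvCols
  rw [List.pairwise_map]
  exact (PySem.List.pairwise_lt_enumerate ranks 0).filter _

theorem pv_sorted2_eq_sorted_toLex {α : Type} (xs : List α) (k1 k2 : α → Int) :
    PySem.List.sorted2 xs k1 k2 false
      = PySem.List.sorted xs (fun x => toLex (k1 x, k2 x)) false := by
  unfold PySem.List.sorted2 PySem.List.sorted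
  simp only [if_neg (by simp : ¬ (false = true))]
  have hfun : (fun (a b : α) => decide (k1 a < k1 b) || (!decide (k1 b < k1 a) && decide (k2 a < k2 b)))
      = fun a b => decide ((fun x => toLex (k1 x, k2 x)) a < (fun x => toLex (k1 x, k2 x)) b) := by
    funext a b
    simp only [Prod.Lex.lt_iff]
    rcases lt_trichotomy (k1 a) (k1 b) with h | h | h <;>
      simp [h, not_lt_of_gt, ne_of_gt, ne_of_lt]
  rw [hfun]

theorem pv_pos_get (sk : List Char) : ∀ (s : Int) (d : PySem.Dict Char Int) (c : Char),
    PySem.Dict.get? ((PySem.List.enumerate sk s).foldl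
      (fun d je => if PySem.Dict.contains d je.2 then d else PySem.Dict.insert d je.2 je.1) d) c
    = Option.or (PySem.Dict.get? d c)
        ((PySem.List.index? sk c).map (fun k : Nat => s + (k : Int))) := by
  induction sk with
  | nil =>
    intro s d c
    rw [PySem.List.enumerate_nil, List.foldl_nil]
    rw [show PySem.List.index? ([] : List Char) c = none from rfl]
    simp
  | cons x xs ih =>
    intro s d c
    rw [PySem.List.enumerate_cons, List.foldl_cons]
    by_cases hcx : c = x
    · subst hcx
      by_cases hdx : PySem.Dict.contains d c
      · rw [if_pos hdx, ih]
        have hsome : (PySem.Dict.get? d c).isSome := by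
          rw [← PySem.Dict.contains_eq_isSome_get?]; exact hdx
        obtain ⟨v, hv⟩ := Option.isSome_iff_exists.1 hsome
        rw [hv]
        rfl
      · rw [if_neg hdx, ih]
        have hget : PySem.Dict.get? d c = none := by
          have h : (PySem.Dict.get? d c).isSome = false := by
            rw [← PySem.Dict.contains_eq_isSome_get?]; exact Bool.eq_false_iff.2 hdx
          exact Option.not_isSome_iff_eq_none.1 (by simp [h])
        rw [hget, PySem.Dict.get?_insert_self, PySem.List.index?_cons_self]
        simp
    · rw [PySem.List.index?_cons_of_ne xs (Ne.symm hcx)]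
      have hmap : (Option.map (fun x => x + 1) (PySem.List.index? xs c)).map (fun k : Nat => s + (k : Int))
          = (PySem.List.index? xs c).map (fun k : Nat => (s + 1) + (k : Int)) := by
        rw [Option.map_map]
        apply Option.map_congr
        intro k _
        simp
        omega
      rw [hmap]
      by_cases hdx : PySem.Dict.contains d x
      · rw [if_pos hdx, ih]
      · rw [if_neg hdx, ih, PySem.Dict.get?_insert_of_ne _ _ hcx]

theorem pv_rank_dict (sk : List Char) (c : Char) (hc : c ∈ sk) :
    PySem.Dict.getD ((PySem.List.enumerate sk 0).foldl
      (fun d je => if PySem.Dict.contains d je.2 then d else PySem.Dict.insert d je.2 je.1)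
      PySem.Dict.empty) c 0
    = (((PySem.List.index? sk c).getD 0 : Nat) : Int) := by
  rw [PySem.Dict.getD_eq_get?_getD, pv_pos_get]
  obtain ⟨k, hk⟩ := Option.isSome_iff_exists.1 ((PySem.List.index?_isSome_iff sk c).2 hc)
  rw [hk]
  simp [PySem.Dict.get?_empty]

theorem pv_mem_J (ranks : List Int) (w n : Nat) (hw : 0 < w) (hlen : ranks.length = w) (j : Int) :
    j ∈ pvJ ranks w n ↔ 0 ≤ j ∧ j < (n : Int) := by
  simp only [pvJ, List.mem_flatMap, List.mem_map, List.mem_filter]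
  constructor
  · rintro ⟨r, hr, i, hi, c, ⟨hc, hcn⟩, rfl⟩
    obtain ⟨k, hk, rfl, -⟩ := (pv_mem_cols ranks r _).1 hc
    have hi' := (PySem.List.mem_pyRange_iff_of_pos (by exact_mod_cast hw) i).1 hi
    obtain ⟨h1, h2, h3⟩ := hi'
    refine ⟨by positivity, by simpa using hcn⟩
  · rintro ⟨hj0, hjn⟩
    have hw' : (0 : Int) < (w : Int) := by exact_mod_cast hw
    have hmod0 : 0 ≤ j % (w : Int) := Int.emod_nonneg j (by omega)
    have hmodw : j % (w : Int) < (w : Int) := Int.emod_lt_of_pos j hw'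
    have hdm : (w : Int) * (j / (w : Int)) + j % (w : Int) = j := Int.mul_ediv_add_emod j (w : Int)
    set i := (w : Int) * (j / (w : Int)) with hi
    have hi0 : 0 ≤ i := by
      have : 0 ≤ j / (w : Int) := Int.ediv_nonneg hj0 (by omega)
      positivity
    set k : Nat := (j % (w : Int)).toNat with hkdef
    have hkw : k < w := by omega
    have hkc : ((k : Int)) = j % (w : Int) := by omega
    have hklen : k < ranks.length := by omega
    refine ⟨ranks[k], ?_, i, ?_, (k : Int), ⟨?_, ?_⟩, ?_⟩
    · rw [PySem.List.mem_sorted, PySem.Set.mem_ofList]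
      exact List.getElem_mem hklen
    · rw [PySem.List.mem_pyRange_iff_of_pos (by omega)]
      exact ⟨hi0, by omega, ⟨j / (w : Int), by omega⟩⟩
    · exact (pv_mem_cols ranks _ _).2 ⟨k, hklen, rfl, rfl⟩
    · simp only [decide_eq_true_eq]; omega
    · omega

theorem pv_pairwise_J (ranks : List Int) (w n : Nat) (hw : 0 < w) (hlen : ranks.length = w) :
    (pvJ ranks w n).Pairwise (fun a b =>
      toLex (PySem.List.pyGetD ranks (PySem.Int.mod a (w : Int)) 0, a)
        < toLex (PySem.List.pyGetD ranks (PySem.Int.mod b (w : Int)) 0, b)) := by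
  have hw' : (0 : Int) < (w : Int) := by exact_mod_cast hw
  -- the key of an element i + k of group r is (r, i + k)
  have hkey : ∀ r (i : Int), i ∈ PySem.List.pyRange 0 (n : Int) (w : Int) →
      ∀ (k : Nat) (hk : k < ranks.length), ranks[k] = r → (k : Int) < (w : Int) →
      PySem.List.pyGetD ranks (PySem.Int.mod (i + (k : Int)) (w : Int)) 0 = r := by
    intro r i hi k hk hr hkw
    obtain ⟨hi0, hin, q, hq⟩ := (PySem.List.mem_pyRange_iff_of_pos hw' i).1 hi
    have hiq : i = (w : Int) * q := by omega
    have hm : PySem.Int.mod (i + (k : Int)) (w : Int) = (k : Int) := by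
      rw [PySem.Int.mod_eq_emod_of_pos hw', hiq]
      rw [Int.add_comm, Int.add_mul_emod_self_left]
      exact Int.emod_eq_of_lt (by positivity) hkw
    rw [hm]
    rw [show ((k : Int)) = ((k : Nat) : Int) from rfl, PySem.List.pyGetD_natCast]
    rw [List.getD_eq_getElem _ _ hk, hr]
  unfold pvJ
  rw [List.pairwise_flatMap]
  constructor
  · -- within one rank group
    intro r hr
    rw [List.pairwise_flatMap]
    constructor
    · -- within one row
      intro i hi
      rw [List.pairwise_map]
      apply List.Pairwise.filter
      apply (pv_pairwise_cols ranks r).imp_of_mem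
      intro c1 c2 hc1 hc2 hlt
      obtain ⟨k1, hk1, rfl, hr1⟩ := (pv_mem_cols ranks r c1).1 hc1
      obtain ⟨k2, hk2, rfl, hr2⟩ := (pv_mem_cols ranks r c2).1 hc2
      rw [Prod.Lex.lt_iff]
      simp only [ofLex_toLex]
      rw [hkey r i hi k1 hk1 hr1 (by omega), hkey r i hi k2 hk2 hr2 (by omega)]
      exact Or.inr ⟨rfl, by omega⟩
    · -- across rows of the same group
      have hpwi : (PySem.List.pyRange 0 (n : Int) (w : Int)).Pairwise (fun i1 i2 => i1 + (w:Int) ≤ i2) := by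
        rw [PySem.List.pyRange_of_pos _ _ hw', List.pairwise_map]
        apply List.pairwise_lt_range.imp_of_mem        -- range pairwise <
        intro a b _ _ hab
        have : (a : Int) + 1 ≤ (b : Int) := by exact_mod_cast hab
        nlinarith [hw']
      apply hpwi.imp_of_mem
      intro i1 i2 hi1 hi2 hle
      intro x hx y hy
      simp only [List.mem_map, List.mem_filter, decide_eq_true_eq] at hx hy
      obtain ⟨c1, ⟨hc1, -⟩, rfl⟩ := hx
      obtain ⟨c2, ⟨hc2, -⟩, rfl⟩ := hy
      obtain ⟨k1, hk1, rfl, hr1⟩ := (pv_mem_cols ranks r c1).1 hc1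
      obtain ⟨k2, hk2, rfl, hr2⟩ := (pv_mem_cols ranks r c2).1 hc2
      rw [Prod.Lex.lt_iff]
      simp only [ofLex_toLex]
      rw [hkey r i1 hi1 k1 hk1 hr1 (by omega), hkey r i2 hi2 k2 hk2 hr2 (by omega)]
      exact Or.inr ⟨rfl, by omega⟩
  · -- across rank groups
    apply (PySem.List.sorted_ofList_pairwise_lt ranks).imp_of_mem
    intro r1 r2 _ _ hlt x hx y hy
    simp only [List.mem_flatMap, List.mem_map, List.mem_filter, decide_eq_true_eq] at hx hy
    obtain ⟨i1, hi1, c1, ⟨hc1, -⟩, rfl⟩ := hx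
    obtain ⟨i2, hi2, c2, ⟨hc2, -⟩, rfl⟩ := hy
    obtain ⟨k1, hk1, rfl, hr1⟩ := (pv_mem_cols ranks r1 c1).1 hc1
    obtain ⟨k2, hk2, rfl, hr2⟩ := (pv_mem_cols ranks r2 c2).1 hc2
    rw [Prod.Lex.lt_iff]
    simp only [ofLex_toLex]
    rw [hkey r1 i1 hi1 k1 hk1 hr1 (by omega), hkey r2 i2 hi2 k2 hk2 hr2 (by omega)]
    exact Or.inl hlt

theorem pv_B_chars (p : List Char) (ranks : List Int) (w : Nat) (hw : 0 < w) (hlen : ranks.length = w) :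
    (PySem.List.sorted2 (PySem.List.pyRange 0 (p.length : Int) 1)
        (fun i => PySem.List.pyGetD ranks (PySem.Int.mod i (w : Int)) 0) (fun i => i) false).map
        (fun i => PySem.List.pyGetD p i ' ')
      = (pvJ ranks w p.length).map (fun j => p.getD j.toNat ' ') := by
  rw [pv_sorted2_eq_sorted_toLex]
  have hsort : PySem.List.sorted (PySem.List.pyRange 0 (p.length : Int) 1)
      (fun x => toLex (PySem.List.pyGetD ranks (PySem.Int.mod x (w : Int)) 0, x)) false
      = pvJ ranks w p.length := by
    apply PySem.List.sorted_eq_of_perm_of_pairwise_lt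
    · have hnd1 : (pvJ ranks w p.length).Nodup :=
        (pv_pairwise_J ranks w p.length hw hlen).imp
          (fun {a b} h => by rintro rfl; exact lt_irrefl _ h)
      have hnd2 := PySem.List.nodup_pyRange_one 0 (p.length : Int)
      rw [List.perm_ext_iff_of_nodup hnd1 hnd2]
      intro a
      rw [pv_mem_J ranks w p.length hw hlen, PySem.List.mem_pyRange_one]
    · exact pv_pairwise_J ranks w p.length hw hlen
  rw [hsort]
  apply List.map_congr_left
  intro j hj
  obtain ⟨h0, hn⟩ := (pv_mem_J ranks w p.length hw hlen j).1 hj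
  rw [show j = ((j.toNat : Nat) : Int) by omega, PySem.List.pyGetD_natCast]
  simp [max_eq_left h0]

theorem pv_flatMap_if_singleton {α β : Type} (l : List α) (q : α → Bool) (g : α → β) :
    l.flatMap (fun x => if q x then [g x] else []) = (l.filter q).map g := by
  induction l with
  | nil => rfl
  | cons x xs ih => by_cases h : q x <;> simp [List.flatMap_cons, h, ih]

theorem pv_A_chars (p : List Char) (ranks : List Int) (w : Nat) (hw : 0 < w) (hlen : ranks.length = w) :
    ((PySem.List.sorted (PySem.Set.ofList ranks) (fun x => x) false).foldl (fun acc r =>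
      if (pvCols ranks r).length = 1 then
        ((PySem.List.pyRange 0 (p.length : Int) (w : Int)).map
            (fun i => PySem.List.slice p (some i) (some (i + (w : Int))))).foldl (fun acc row =>
          if PySem.List.pyGetD (pvCols ranks r) 0 0 < (row.length : Int) then
            acc ++ [PySem.List.pyGetD row (PySem.List.pyGetD (pvCols ranks r) 0 0) ' '] else acc) acc
      else
        ((PySem.List.pyRange 0 (p.length : Int) (w : Int)).map
            (fun i => PySem.List.slice p (some i) (some (i + (w : Int))))).foldl (fun acc row =>
          (pvCols ranks r).foldl (fun acc colIdx =>
            if colIdx < (row.length : Int) then acc ++ [PySem.List.pyGetD row colIdx ' '] else acc) acc) acc) [])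
      = (pvJ ranks w p.length).map (fun j => p.getD j.toNat ' ') := by
  have hw' : (0 : Int) < (w : Int) := by exact_mod_cast hw
  set n := p.length with hn
  set grid := (PySem.List.pyRange 0 (n : Int) (w : Int)).map
      (fun i => PySem.List.slice p (some i) (some (i + (w : Int)))) with hgrid
  -- each loop body appends one rank group's characters
  have hbody : ∀ (acc : List Char) (r : Int), r ∈ PySem.List.sorted (PySem.Set.ofList ranks) (fun x => x) false →
      (if (pvCols ranks r).length = 1 then
        grid.foldl (fun acc row =>
          if PySem.List.pyGetD (pvCols ranks r) 0 0 < (row.length : Int) then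
            acc ++ [PySem.List.pyGetD row (PySem.List.pyGetD (pvCols ranks r) 0 0) ' '] else acc) acc
      else
        grid.foldl (fun acc row =>
          (pvCols ranks r).foldl (fun acc colIdx =>
            if colIdx < (row.length : Int) then acc ++ [PySem.List.pyGetD row colIdx ' '] else acc) acc) acc)
      = acc ++ grid.flatMap (fun row =>
          ((pvCols ranks r).filter (fun c => decide (c < (row.length : Int)))).map
            (fun c => PySem.List.pyGetD row c ' ')) := by
    intro acc r _
    by_cases h1 : (pvCols ranks r).length = 1
    · obtain ⟨a, ha⟩ := List.length_eq_one_iff.1 h1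
      rw [if_pos h1, ha]
      have hg0 : PySem.List.pyGetD ([a] : List Int) 0 0 = a := by simp [PySem.List.pyGetD]
      rw [hg0]
      rw [PySem.List.foldl_append_ite (p := fun row : List Char => a < (row.length : Int))
        (f := fun row => PySem.List.pyGetD row a ' ')]
      have hsing : ∀ row : List Char,
          (([a] : List Int).filter (fun c => decide (c < (row.length : Int)))).map
              (fun c => PySem.List.pyGetD row c ' ')
            = if decide (a < (row.length : Int)) then [PySem.List.pyGetD row a ' '] else [] := by
        intro row
        by_cases hq : a < (row.length : Int) <;> simp [hq]
      rw [List.flatMap_congr (fun row _ => hsing row), pv_flatMap_if_singleton]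
    · rw [if_neg h1]
      rw [PySem.List.foldl_congr_mem grid _
        (fun acc row => acc ++ ((pvCols ranks r).filter (fun c => decide (c < (row.length : Int)))).map
            (fun c => PySem.List.pyGetD row c ' ')) acc
        (fun acc row _ => PySem.List.foldl_append_ite _ _ _ _)]
      rw [PySem.List.foldl_append_eq_flatMap]
  rw [PySem.List.foldl_congr_mem _ _
    (fun acc r => acc ++ grid.flatMap (fun row =>
      ((pvCols ranks r).filter (fun c => decide (c < (row.length : Int)))).map
        (fun c => PySem.List.pyGetD row c ' '))) []
    (fun acc r hr => hbody acc r hr)]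
  rw [PySem.List.foldl_append_eq_flatMap, List.nil_append]
  -- rewrite each group through the grid geometry
  have hG : ∀ r : Int,
      grid.flatMap (fun row =>
        ((pvCols ranks r).filter (fun c => decide (c < (row.length : Int)))).map
          (fun c => PySem.List.pyGetD row c ' '))
      = (PySem.List.pyRange 0 (n : Int) (w : Int)).flatMap (fun i =>
          (((pvCols ranks r).filter (fun c => decide (i + c < (n : Int)))).map (fun c => i + c)).map
            (fun j => p.getD j.toNat ' ')) := by
    intro r
    rw [hgrid, List.flatMap_map]
    apply List.flatMap_congr
    intro i hi
    obtain ⟨hi0, hin, q, hq⟩ := (PySem.List.mem_pyRange_iff_of_pos hw' i).1 hi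
    have hrow : PySem.List.slice p (some i) (some (i + (w : Int))) = (p.drop i.toNat).take w := by
      rw [PySem.List.slice_toNat p hi0 (by omega)]
      congr 1
      omega
    rw [hrow, List.map_map]
    have hlenrow : ((p.drop i.toNat).take w).length = min w (n - i.toNat) := by simp [hn]
    have hfilter : (pvCols ranks r).filter (fun c => decide (c < (((p.drop i.toNat).take w).length : Int)))
        = (pvCols ranks r).filter (fun c => decide (i + c < (n : Int))) := by
      apply List.filter_congr
      intro c hc
      obtain ⟨k, hk, rfl, -⟩ := (pv_mem_cols ranks r c).1 hc
      rw [hlenrow]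
      simp only [decide_eq_decide]
      omega
    rw [hfilter]
    apply List.map_congr_left
    intro c hc
    rw [List.mem_filter] at hc
    obtain ⟨hc, hcn⟩ := hc
    obtain ⟨k, hk, rfl, -⟩ := (pv_mem_cols ranks r _).1 hc
    have hcn' : i + (k : Int) < (n : Int) := by simpa using hcn
    have hkrow : k < ((p.drop i.toNat).take w).length := by rw [hlenrow]; omega
    rw [PySem.List.pyGetD_natCast]
    simp only [Function.comp_apply]
    rw [List.getD_eq_getElem _ _ hkrow]
    rw [List.getD_eq_getElem _ _ (by simp [hn] at hcn' ⊢; omega :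
      ((i + (k : Int)).toNat) < p.length)]
    rw [List.getElem_take, List.getElem_drop]
    congr 1
    omega
  rw [List.flatMap_congr (fun r _ => hG r)]
  unfold pvJ
  rw [List.map_flatMap]
  apply List.flatMap_congr
  intro r _
  rw [List.map_flatMap]


-- ===== VERDICT (by name: the statement is the Claim_ definition above) =====
theorem myszowski_encrypt_spec : Claim_equal_myszowski_encrypt := by
  intro plaintext keyword _ hpre
  unfold Spec_myszowski_encrypt
  unfold myszowski_encrypt myszowski_encrypt_alt
  dsimp only
  set P : List Char := PySem.Chars.upper (PySem.Chars.replace plaintext.toList [' '] []) with hP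
  set KW : List Char := PySem.Chars.upper keyword.toList with hKW
  have hkl : keyword.toList ≠ [] := by
    intro h
    apply hpre
    have := congrArg String.ofList h
    simpa using this
  have hw : 0 < KW.length := by
    rw [hKW]
    have : (PySem.Chars.upper keyword.toList).length = keyword.toList.length := by
      simp [PySem.Chars.upper]
    rw [this]
    exact List.length_pos_iff.2 hkl
  have hranks : KW.map (fun c => PySem.Dict.getD ((PySem.List.enumerate
        (PySem.List.sorted KW (fun c => c) false)).foldl
        (fun d je => if PySem.Dict.contains d je.2 then d else PySem.Dict.insert d je.2 je.1)
        PySem.Dict.empty) c 0)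
      = KW.map (fun c => (((PySem.List.index? (PySem.List.sorted KW (fun x => x) false) c).getD 0 : Nat) : Int)) :=
    List.map_congr_left (fun c hc =>
      pv_rank_dict (PySem.List.sorted KW (fun c => c) false) c
        ((PySem.List.mem_sorted KW (fun c => c) false c).2 hc))
  rw [hranks]
  set R : List Int := KW.map (fun c =>
    (((PySem.List.index? (PySem.List.sorted KW (fun x => x) false) c).getD 0 : Nat) : Int)) with hR
  have hRlen : R.length = KW.length := by rw [hR, List.length_map]
  have hcols : ∀ r : Int,
      ((PySem.List.enumerate R).filter (fun iv => iv.2 == r)).map (fun iv => iv.1) = pvCols R r :=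
    fun _ => rfl
  simp only [hcols]
  rw [pv_A_chars P R KW.length hw hRlen, pv_B_chars P R KW.length hw hRlen]
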